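-- pv_equiv track=rewrite | github.com/leto19/majel | majel.py | word_to_character
-- ===== SOURCE A (Python) =====
-- def word_to_character(phrase):
--     for n,i in enumerate(phrase):
--         if i == " " or i =="slash":
--             phrase[n] = "/"
--         if i == "dot":
--             phrase[n] ="."
--         if i == "dash":
--             phrase[n] = "-"+phrase[n+1]
--             phrase.pop(n+1)
--     return phrase
-- ===== SOURCE B (Python) =====
-- def word_to_character(phrase):
--     # One forward pass with an explicit index building a fresh list, then
--     # copied back into the argument so it is mutated in place like the original.
--     result = []
--     i = 0
--     while i < len(phrase):
--         t = phrase[i]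
--         if t == " " or t == "slash":
--             result.append("/")
--             i += 1
--         elif t == "dot":
--             result.append(".")
--             i += 1
--         elif t == "dash":
--             result.append("-" + phrase[i + 1])  # IndexError propagates like A's
--             i += 2
--         else:
--             result.append(t)
--             i += 1
--     phrase[:] = result
--     return phrase
-- ===== Notes on version B (the rewrite author's own statement) =====
-- stated objective: alternative
-- what changed: B replaces A's mutate-while-enumerating loop (item assignment plus pop, which shifts the tail on every dash) with a single forward index scan that builds a fresh output list, skipping the token consumed by a dash by advancing the index by two, then writes it back with phrase[:] = result.
import Mathlib
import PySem

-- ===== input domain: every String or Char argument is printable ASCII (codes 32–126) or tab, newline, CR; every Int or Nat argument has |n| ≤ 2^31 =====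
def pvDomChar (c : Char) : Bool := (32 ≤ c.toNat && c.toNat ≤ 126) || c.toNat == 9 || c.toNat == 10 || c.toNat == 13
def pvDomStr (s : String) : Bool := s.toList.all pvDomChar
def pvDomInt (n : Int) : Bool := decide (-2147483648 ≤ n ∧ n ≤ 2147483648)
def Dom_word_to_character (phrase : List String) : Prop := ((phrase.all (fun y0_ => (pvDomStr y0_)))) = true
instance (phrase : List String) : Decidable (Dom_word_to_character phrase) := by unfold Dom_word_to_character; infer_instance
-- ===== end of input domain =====

-- B replaces A's mutate-while-enumerating loop (assignment + pop) with one forward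
-- index scan building a fresh list (written back in place); equivalence is about the
-- return value (both end up performing the same net in-place mutation).


-- ===== PORT A =====
-- for n,i in enumerate(phrase): three ifs mutating the live list; pop(n+1) ported as
-- eraseIdx (n+1), exact here since pyGet? has already established n+1 is in range.
def wtcGoA (lst : List String) (n : Nat) : List String :=
  if h : n < lst.length then
    let i := lst[n]
    let l1 := if i = " " ∨ i = "slash" then lst.set n "/" else lst
    let l2 := if i = "dot" then l1.set n "." else l1
    if i = "dash" then
      match PySem.List.pyGet? l2 ((n : Int) + 1) with
      | some nxt => wtcGoA ((l2.set n ("-" ++ nxt)).eraseIdx (n + 1)) (n + 1)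
      | none => l2   -- IndexError; excluded by Pre_
    else wtcGoA l2 (n + 1)
  else lst
termination_by lst.length - n
decreasing_by
  all_goals simp [apply_ite List.length, List.length_set, List.length_eraseIdx]
  all_goals first | (split <;> omega) | omega

def word_to_character (phrase : List String) : List String := wtcGoA phrase 0

-- ===== PORT B =====
-- while i < len(phrase): build `result`; dash consumes the raw next token (index += 2).
def wtcGoB (phrase : List String) (i : Nat) (result : List String) : List String :=
  if h : i < phrase.length then
    let t := phrase[i]
    if t = " " ∨ t = "slash" then wtcGoB phrase (i + 1) (result ++ ["/"])
    else if t = "dot" then wtcGoB phrase (i + 1) (result ++ ["."])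
    else if t = "dash" then
      match PySem.List.pyGet? phrase ((i : Int) + 1) with
      | some nxt => wtcGoB phrase (i + 2) (result ++ ["-" ++ nxt])
      | none => result   -- IndexError; excluded by Pre_
    else wtcGoB phrase (i + 1) (result ++ [t])
  else result
termination_by phrase.length - i

def word_to_character_alt (phrase : List String) : List String := wtcGoB phrase 0 []

-- ===== PRECONDITION & SPEC =====
-- Pre_ excludes exactly the inputs on which A raises IndexError: those where the
-- left-to-right scan (dash consuming the following token) reaches a "dash" with no
-- token after it. B raises the same IndexError there.
def pvBadDash : List String → Bool
  | [] => false
  | t :: rest =>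
    if t = "dash" then
      match rest with
      | [] => true
      | _ :: rest' => pvBadDash rest'
    else pvBadDash rest

def Pre_word_to_character (phrase : List String) : Prop := pvBadDash phrase = false
instance (phrase : List String) : Decidable (Pre_word_to_character phrase) := by
  unfold Pre_word_to_character; infer_instance

def pvWitness_word_to_character : List String := [" ", "dot", "dash", "ab", "slash", "x"]

def Spec_word_to_character (phrase : List String) (out : List String) : Prop := out = word_to_character_alt phrase
instance (phrase : List String) (out : List String) : Decidable (Spec_word_to_character phrase out) := by unfold Spec_word_to_character; infer_instance

-- ===== CLAIM (what is proved, stated in full; the proofs are below) =====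
def Claim_equal_word_to_character : Prop := ∀ (phrase : List String), Dom_word_to_character phrase → Pre_word_to_character phrase → Spec_word_to_character phrase (word_to_character phrase)

-- ===== LEMMAS AND PROOFS =====

-- the common pure scan both loops compute
def wtcF : List String → List String
  | [] => []
  | t :: rest =>
    if t = " " ∨ t = "slash" then "/" :: wtcF rest
    else if t = "dot" then "." :: wtcF rest
    else if t = "dash" then
      match rest with
      | [] => []
      | nxt :: rest' => ("-" ++ nxt) :: wtcF rest'
    else t :: wtcF rest

theorem wtcF_nil : wtcF [] = [] := rfl

theorem wtcF_cons (t : String) (rest : List String) :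
    wtcF (t :: rest) =
      (if t = " " ∨ t = "slash" then "/" :: wtcF rest
       else if t = "dot" then "." :: wtcF rest
       else if t = "dash" then
         match rest with
         | [] => []
         | nxt :: rest' => ("-" ++ nxt) :: wtcF rest'
       else t :: wtcF rest) := by
  rw [wtcF.eq_def]

theorem bad_cons (t : String) (rest : List String) :
    pvBadDash (t :: rest) =
      (if t = "dash" then
         match rest with
         | [] => true
         | _ :: rest' => pvBadDash rest'
       else pvBadDash rest) := by
  rw [pvBadDash.eq_def]

theorem wtc_set_append (pre : List String) (y v : String) (ys : List String) :
    (pre ++ y :: ys).set pre.length v = pre ++ v :: ys := by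
  induction pre with
  | nil => simp
  | cons a pre ih => simp [ih]

theorem wtc_erase_append (pre : List String) (y : String) (ys : List String) :
    (pre ++ y :: ys).eraseIdx pre.length = pre ++ ys := by
  induction pre with
  | nil => simp
  | cons a pre ih => simp [ih]

theorem wtc_get_append (pre : List String) (y : String) (ys : List String) :
    (pre ++ y :: ys)[pre.length]'(by simp) = y := by
  simp

theorem lemA : ∀ (k : Nat) (rest done : List String), rest.length ≤ k →
    pvBadDash rest = false → wtcGoA (done ++ rest) done.length = done ++ wtcF rest := by
  intro k
  induction k with
  | zero =>
    intro rest done hk _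
    have : rest = [] := List.eq_nil_of_length_eq_zero (Nat.le_zero.mp hk)
    subst this
    rw [wtcGoA]
    simp [wtcF_nil]
  | succ k ih =>
    intro rest done hk hbad
    match rest with
    | [] =>
      rw [wtcGoA]; simp [wtcF_nil]
    | t :: rest₂ =>
      have hk2 : rest₂.length ≤ k := by simp at hk; omega
      have hlt : done.length < (done ++ t :: rest₂).length := by simp
      rw [wtcGoA]
      rw [dif_pos hlt]
      simp only [wtc_get_append]
      by_cases h1 : t = " " ∨ t = "slash"
      · have ht2 : ¬ t = "dot" := by rcases h1 with h | h <;> subst h <;> decide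
        have ht3 : ¬ t = "dash" := by rcases h1 with h | h <;> subst h <;> decide
        have hbad2 : pvBadDash rest₂ = false := by
          rw [bad_cons, if_neg ht3] at hbad; exact hbad
        rw [if_pos h1, if_neg ht2, if_neg ht3]
        rw [wtc_set_append]
        have he : done ++ "/" :: rest₂ = (done ++ ["/"]) ++ rest₂ := by simp
        have hlen : done.length + 1 = (done ++ ["/"]).length := by simp
        rw [he, hlen, ih rest₂ (done ++ ["/"]) hk2 hbad2]
        rw [wtcF_cons, if_pos h1]
        simp
      · by_cases h2 : t = "dot"
        · have ht3 : ¬ t = "dash" := by subst h2; decide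
          have hbad2 : pvBadDash rest₂ = false := by
            rw [bad_cons, if_neg ht3] at hbad; exact hbad
          rw [if_neg h1, if_pos h2, if_neg ht3]
          rw [wtc_set_append]
          have he : done ++ "." :: rest₂ = (done ++ ["."]) ++ rest₂ := by simp
          have hlen : done.length + 1 = (done ++ ["."]).length := by simp
          rw [he, hlen, ih rest₂ (done ++ ["."]) hk2 hbad2]
          rw [wtcF_cons, if_neg h1, if_pos h2]
          simp
        · by_cases h3 : t = "dash"
          · subst h3
            match rest₂ with
            | [] => rw [bad_cons] at hbad; simp at hbad
            | nxt :: rest₃ =>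
              have hbad2 : pvBadDash rest₃ = false := by
                rw [bad_cons] at hbad; simpa using hbad
              rw [if_neg h1, if_neg h2, if_pos rfl]
              have hget : PySem.List.pyGet? (done ++ "dash" :: nxt :: rest₃) ((done.length : Int) + 1)
                  = some nxt := by
                have hc : ((done.length : Int) + 1) = (((done.length + 1 : Nat)) : Int) := by push_cast; ring
                rw [hc, PySem.List.pyGet?_natCast]
                rw [List.getElem?_append_right (by simp)]
                simp
              simp only [hget]
              rw [wtc_set_append]
              have hre : done ++ ("-" ++ nxt) :: nxt :: rest₃
                  = (done ++ [("-" ++ nxt)]) ++ nxt :: rest₃ := by simp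
              have hlen1 : done.length + 1 = (done ++ [("-" ++ nxt)]).length := by simp
              rw [hre, hlen1, wtc_erase_append]
              have hk3 : rest₃.length ≤ k := by simp at hk; omega
              rw [ih rest₃ (done ++ [("-" ++ nxt)]) hk3 hbad2]
              rw [wtcF_cons]
              simp
          · have hbad2 : pvBadDash rest₂ = false := by
              rw [bad_cons, if_neg h3] at hbad; exact hbad
            rw [if_neg h1, if_neg h2, if_neg h3]
            have he : done ++ t :: rest₂ = (done ++ [t]) ++ rest₂ := by simp
            have hlen : done.length + 1 = (done ++ [t]).length := by simp
            rw [he, hlen, ih rest₂ (done ++ [t]) hk2 hbad2]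
            rw [wtcF_cons, if_neg h1, if_neg h2, if_neg h3]
            simp

theorem lemB (phrase : List String) : ∀ (k i : Nat) (result : List String),
    phrase.length - i ≤ k → wtcGoB phrase i result = result ++ wtcF (phrase.drop i) := by
  intro k
  induction k with
  | zero =>
    intro i result hk
    have hge : phrase.length ≤ i := by omega
    rw [wtcGoB, dif_neg (by omega)]
    rw [List.drop_eq_nil_of_le hge, wtcF_nil]
    simp
  | succ k ih =>
    intro i result hk
    by_cases h : i < phrase.length
    · have hdrop : phrase.drop i = phrase[i] :: phrase.drop (i + 1) :=
        (List.getElem_cons_drop h).symm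
      rw [wtcGoB, dif_pos h]
      by_cases h1 : phrase[i] = " " ∨ phrase[i] = "slash"
      · rw [if_pos h1, ih (i + 1) _ (by omega)]
        rw [hdrop, wtcF_cons, if_pos h1]
        simp
      · by_cases h2 : phrase[i] = "dot"
        · rw [if_neg h1, if_pos h2, ih (i + 1) _ (by omega)]
          rw [hdrop, wtcF_cons, if_neg h1, if_pos h2]
          simp
        · by_cases h3 : phrase[i] = "dash"
          · rw [if_neg h1, if_neg h2, if_pos h3]
            have hcast : ((i : Int) + 1) = (((i + 1 : Nat)) : Int) := by push_cast; ring
            rw [hcast, PySem.List.pyGet?_natCast]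
            by_cases h4 : i + 1 < phrase.length
            · have hdrop2 : phrase.drop (i + 1) = phrase[i + 1] :: phrase.drop (i + 2) :=
                (List.getElem_cons_drop h4).symm
              rw [List.getElem?_eq_getElem h4]
              simp only
              rw [ih (i + 2) _ (by omega)]
              rw [hdrop, hdrop2, wtcF_cons, if_neg h1, if_neg h2, if_pos h3]
              simp
            · rw [List.getElem?_eq_none (by omega)]
              have hnil : phrase.drop (i + 1) = [] := List.drop_eq_nil_of_le (by omega)
              rw [hdrop, hnil, wtcF_cons, if_neg h1, if_neg h2, if_pos h3]
              simp
          · rw [if_neg h1, if_neg h2, if_neg h3, ih (i + 1) _ (by omega)]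
            rw [hdrop, wtcF_cons, if_neg h1, if_neg h2, if_neg h3]
            simp
    · rw [wtcGoB, dif_neg h]
      rw [List.drop_eq_nil_of_le (by omega), wtcF_nil]
      simp

-- ===== VERDICT (by name: the statement is the Claim_ definition above) =====
theorem word_to_character_spec : Claim_equal_word_to_character := by
  intro phrase _ hpre
  unfold Spec_word_to_character word_to_character word_to_character_alt
  have hA : wtcGoA phrase 0 = wtcF phrase := by
    have := lemA phrase.length phrase [] (le_refl _) hpre
    simpa using this
  have hB : wtcGoB phrase 0 [] = wtcF phrase := by
    have := lemB phrase phrase.length 0 [] (by omega)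
    simpa using this
  rw [hA, hB]
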